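-- pv_equiv track=rewrite | github.com/joobang/algorithm | etc/quad_tree.py | solution
-- ===== SOURCE A (Python) =====
-- from collections import deque
--
-- def solution(a,b):
--     a_arr = [[0 for _ in range(32)] for _ in range(32)]
--     b_arr = [[0 for _ in range(32)] for _ in range(32)]
--     a_queue = deque(a)
--     b_queue = deque(b)
--     # 1 data[x ~ x + size/2][y + size/2 ~ y + size]
--     # 2 data[x ~ x + size/2][y ~ y + size/2]
--     # 3 data[x + size/2 ~ x + size][y ~ y + size/2]
--     # 4 data[x + size/2 ~ x + size][y + size/2 ~ y + size]
--
--     def makePixel(queue,x,y,size,data):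
--         s = queue.popleft()
--         if s == "p":
--             size = size//2
--             makePixel(queue,x,y+size,size,data)
--             makePixel(queue,x,y,size,data)
--             makePixel(queue,x+size,y,size,data)
--             makePixel(queue,x+size,y+size,size,data)
--         elif s == "w":
--             for i in range(x,x+size):
--                 for j in range(y,y+size):
--                     data[i][j] = 0
--         elif s == "b":
--             for i in range(x,x+size):
--                 for j in range(y,y+size):
--                     data[i][j] = 1
--
--     makePixel(a_queue,0,0,32,a_arr)
--     makePixel(b_queue,0,0,32,b_arr)
--
--     cnt = 0
--     for i in range(32):
--         for j in range(32):
--             if a_arr[i][j] == 1 or b_arr[i][j] == 1: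
--                 cnt += 1
--
--
--     return cnt
-- ===== SOURCE B (Python) =====
-- def solution(a, b):
--     # Parallel arithmetic merge of the two token streams: no grids, no cell sets,
--     # just black areas added up while both encodings are consumed in lock-step.
--     def count_one(it, size):
--         return count_rest(it, next(it), size)
--
--     def count_rest(it, s, size):
--         if s == "p":
--             h = size // 2
--             return count_one(it, h) + count_one(it, h) + count_one(it, h) + count_one(it, h)
--         return size * size if s == "b" else 0
--
--     def merge(ia, ib, size):
--         sa = next(ia)
--         sb = next(ib)
--         if sa == "p" and sb == "p":
--             h = size // 2
--             return merge(ia, ib, h) + merge(ia, ib, h) + merge(ia, ib, h) + merge(ia, ib, h)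
--         ca = count_rest(ia, sa, size)
--         cb = count_rest(ib, sb, size)
--         return size * size if (sa == "b" or sb == "b") else ca + cb
--
--     return merge(iter(a), iter(b), 32)
-- ===== Notes on version B (the rewrite author's own statement) =====
-- stated objective: simpler
-- what changed: B never builds the two 32x32 grids or any cell collection: it merges the two token streams in parallel, adding size*size when either head is 'b' (consuming the partner subtree arithmetically via count_rest) and summing both subtree areas when neither is, recursing only when both heads are 'p'.
import Mathlib
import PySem

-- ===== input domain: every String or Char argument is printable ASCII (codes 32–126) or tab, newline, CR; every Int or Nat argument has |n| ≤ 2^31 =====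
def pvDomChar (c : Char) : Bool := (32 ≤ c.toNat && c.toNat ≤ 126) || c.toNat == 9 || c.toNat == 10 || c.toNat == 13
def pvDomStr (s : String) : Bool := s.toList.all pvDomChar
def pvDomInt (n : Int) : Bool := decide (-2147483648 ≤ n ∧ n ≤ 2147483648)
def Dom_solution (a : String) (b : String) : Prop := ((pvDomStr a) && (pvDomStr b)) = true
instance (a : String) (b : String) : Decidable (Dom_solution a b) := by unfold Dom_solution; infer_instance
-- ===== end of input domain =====

-- B replaces A's two painted 32×32 grids and 1024-cell OR-counting scan by a parallel
-- arithmetic merge of the two token streams that only adds up black areas (objective: simpler).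

-- ===== PORT A =====

-- data[i][j] = v : exact Python nested list assignment (none = IndexError)
def pvSet2? (g : List (List Int)) (i j v : Int) : Option (List (List Int)) :=
  match PySem.List.pyGet? g i with
  | none => none
  | some row =>
    match PySem.List.pySet? row j v with
    | none => none
    | some row' => PySem.List.pySet? g i row'

-- for j in js: data[i][j] = v
def pvFillRow (g : List (List Int)) (i : Int) (js : List Int) (v : Int) :
    Option (List (List Int)) :=
  match js with
  | [] => some g
  | j :: rest =>
    match pvSet2? g i j v with
    | none => none
    | some g' => pvFillRow g' i rest v

-- for i in is: for j in range(y, y+size): data[i][j] = v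
def pvFillRect (g : List (List Int)) (is : List Int) (y size v : Int) :
    Option (List (List Int)) :=
  match is with
  | [] => some g
  | i :: rest =>
    match pvFillRow g i (PySem.List.pyRange y (y + size) 1) v with
    | none => none
    | some g' => pvFillRect g' rest y size v

-- makePixel; fuel = number of not-yet-consumed tokens (each call consumes ≥ 1 token,
-- so fuel q.length never runs out); none = IndexError (popleft from an empty deque)
def pvMakePixel : Nat → List Char → Int → Int → Int → List (List Int) →
    Option (List Char × List (List Int))
  | 0, _, _, _, _, _ => none
  | fuel + 1, q, x, y, size, g =>
    match q with
    | [] => none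
    | s :: q1 =>
      if s = 'p' then
        let h := PySem.Int.floordiv size 2
        match pvMakePixel fuel q1 x (y + h) h g with
        | none => none
        | some (q2, g1) =>
          match pvMakePixel fuel q2 x y h g1 with
          | none => none
          | some (q3, g2) =>
            match pvMakePixel fuel q3 (x + h) y h g2 with
            | none => none
            | some (q4, g3) => pvMakePixel fuel q4 (x + h) (y + h) h g3
      else if s = 'w' then
        match pvFillRect g (PySem.List.pyRange x (x + size) 1) y size 0 with
        | none => none
        | some g' => some (q1, g')
      else if s = 'b' then
        match pvFillRect g (PySem.List.pyRange x (x + size) 1) y size 1 with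
        | none => none
        | some g' => some (q1, g')
      else some (q1, g)

-- a_arr[i][j] ; exact here: the count loop below reads only indices 0..31 of 32×32 grids
def pvGet2 (g : List (List Int)) (i j : Int) : Int :=
  (Option.bind (PySem.List.pyGet? g i) (fun row => PySem.List.pyGet? row j)).getD 0

def pvCountRow (ga gb : List (List Int)) (i : Int) (js : List Int) (cnt : Int) : Int :=
  match js with
  | [] => cnt
  | j :: rest =>
    pvCountRow ga gb i rest
      (if pvGet2 ga i j == 1 || pvGet2 gb i j == 1 then cnt + 1 else cnt)

def pvCountGrid (ga gb : List (List Int)) (is : List Int) (cnt : Int) : Int :=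
  match is with
  | [] => cnt
  | i :: rest => pvCountGrid ga gb rest (pvCountRow ga gb i (PySem.List.pyRange 0 32 1) cnt)

def pvInit : List (List Int) := List.replicate 32 (List.replicate 32 0)

def solution (a : String) (b : String) : Int :=
  match pvMakePixel a.toList.length a.toList 0 0 32 pvInit with
  | none => 0   -- Python raises IndexError here; excluded by Pre_solution
  | some (_, ga) =>
    match pvMakePixel b.toList.length b.toList 0 0 32 pvInit with
    | none => 0 -- Python raises IndexError here; excluded by Pre_solution
    | some (_, gb) => pvCountGrid ga gb (PySem.List.pyRange 0 32 1) 0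

-- ===== PORT B =====

-- count_one(it, size): black area of one subtree, consuming it.
-- fuel = unconsumed tokens (each call consumes ≥ 1); none = StopIteration.
def pvCountOne : Nat → List Char → Int → Option (List Char × Int)
  | 0, _, _ => none
  | _ + 1, [], _ => none
  | fuel + 1, s :: q1, size =>
    if s = 'p' then
      let h := PySem.Int.floordiv size 2
      match pvCountOne fuel q1 h with
      | none => none
      | some (q2, n1) =>
        match pvCountOne fuel q2 h with
        | none => none
        | some (q3, n2) =>
          match pvCountOne fuel q3 h with
          | none => none
          | some (q4, n3) =>
            match pvCountOne fuel q4 h with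
            | none => none
            | some (q5, n4) => some (q5, n1 + n2 + n3 + n4)
    else if s = 'b' then some (q1, size * size)
    else some (q1, 0)

-- count_rest(it, s, size): like count_one but the head token s was already popped
def pvCountRest (fuel : Nat) (q : List Char) (s : Char) (size : Int) :
    Option (List Char × Int) :=
  if s = 'p' then
    let h := PySem.Int.floordiv size 2
    match pvCountOne fuel q h with
    | none => none
    | some (q2, n1) =>
      match pvCountOne fuel q2 h with
      | none => none
      | some (q3, n2) =>
        match pvCountOne fuel q3 h with
        | none => none
        | some (q4, n3) =>
          match pvCountOne fuel q4 h with
          | none => none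
          | some (q5, n4) => some (q5, n1 + n2 + n3 + n4)
  else if s = 'b' then some (q, size * size)
  else some (q, 0)

-- merge(ia, ib, size): area of the union, consuming both streams in lock-step
def pvMerge : Nat → List Char → List Char → Int → Option (List Char × List Char × Int)
  | 0, _, _, _ => none
  | fuel + 1, qa, qb, size =>
    match qa with
    | [] => none
    | sa :: qa1 =>
      match qb with
      | [] => none
      | sb :: qb1 =>
        if sa = 'p' ∧ sb = 'p' then
          let h := PySem.Int.floordiv size 2
          match pvMerge fuel qa1 qb1 h with
          | none => none
          | some (qa2, qb2, m1) =>
            match pvMerge fuel qa2 qb2 h with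
            | none => none
            | some (qa3, qb3, m2) =>
              match pvMerge fuel qa3 qb3 h with
              | none => none
              | some (qa4, qb4, m3) =>
                match pvMerge fuel qa4 qb4 h with
                | none => none
                | some (qa5, qb5, m4) => some (qa5, qb5, m1 + m2 + m3 + m4)
        else
          match pvCountRest fuel qa1 sa size with
          | none => none
          | some (qa2, ca) =>
            match pvCountRest fuel qb1 sb size with
            | none => none
            | some (qb2, cb) =>
              some (qa2, qb2, if sa = 'b' ∨ sb = 'b' then size * size else ca + cb)

def solution_alt (a : String) (b : String) : Int :=
  match pvMerge (a.toList.length + b.toList.length) a.toList b.toList 32 with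
  | none => 0   -- Python raises StopIteration here; excluded by Pre_solution
  | some (_, _, n) => n

-- ===== PRECONDITION & SPEC =====

-- pvOk cs n = "cs starts with n complete quad-tree encodings" (balanced-token scan:
-- a 'p' opens four subtrees, any other character closes one)
def pvOk : List Char → Nat → Bool
  | _, 0 => true
  | [], _ + 1 => false
  | c :: rest, n + 1 => pvOk rest (if c = 'p' then n + 4 else n)

-- Pre_ excludes exactly the inputs on which A raises IndexError
-- (a string that ends before its first quad-tree encoding is complete).
def Pre_solution (a : String) (b : String) : Prop :=
  pvOk a.toList 1 = true ∧ pvOk b.toList 1 = true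
instance (a : String) (b : String) : Decidable (Pre_solution a b) := by
  unfold Pre_solution; infer_instance

def pvWitness_solution : String × String := ("pwbwb", "b")

def Spec_solution (a : String) (b : String) (out : Int) : Prop := out = solution_alt a b
instance (a : String) (b : String) (out : Int) : Decidable (Spec_solution a b out) := by
  unfold Spec_solution; infer_instance

-- ===== CLAIM (what is proved, stated in full; the proofs are below) =====
def Claim_equal_solution : Prop := ∀ (a : String) (b : String), Dom_solution a b →
  Pre_solution a b → Spec_solution a b (solution a b)

-- ===== LEMMAS AND PROOFS =====

-- The set of black cells of one subtree (the common specification of both ports):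
-- mirrors A's recursion on the token stream, returning the painted cells as a set.
def pvBlacks : Nat → List Char → Int → Int → Int →
    Option (List Char × PySem.Set (Int × Int))
  | 0, _, _, _, _ => none
  | fuel + 1, q, x, y, size =>
    match q with
    | [] => none
    | s :: q1 =>
      if s = 'p' then
        let h := PySem.Int.floordiv size 2
        match pvBlacks fuel q1 x (y + h) h with
        | none => none
        | some (q2, c1) =>
          match pvBlacks fuel q2 x y h with
          | none => none
          | some (q3, c2) =>
            match pvBlacks fuel q3 (x + h) y h with
            | none => none
            | some (q4, c3) =>
              match pvBlacks fuel q4 (x + h) (y + h) h with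
              | none => none
              | some (q5, c4) =>
                some (q5, PySem.Set.union (PySem.Set.union (PySem.Set.union
                  (PySem.Set.union PySem.Set.empty c1) c2) c3) c4)
      else if s = 'b' then some (q1, PySem.Set.ofList (pvRect x y size))
      else some (q1, PySem.Set.empty)
where
  pvRect (x y size : Int) : List (Int × Int) :=
    (PySem.List.pyRange x (x + size) 1).flatMap
      (fun i => (PySem.List.pyRange y (y + size) 1).map (fun j => (i, j)))

abbrev pvRect (x y size : Int) : List (Int × Int) := pvBlacks.pvRect x y size

abbrev pvInR (c : Int × Int) (x y size : Int) : Prop :=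
  x ≤ c.1 ∧ c.1 < x + size ∧ y ≤ c.2 ∧ c.2 < y + size

abbrev pvValid (i j : Int) : Prop := 0 ≤ i ∧ i < 32 ∧ 0 ≤ j ∧ j < 32

abbrev pvWF (g : List (List Int)) : Prop := g.length = 32 ∧ ∀ row ∈ g, row.length = 32

lemma pvMemRect (c : Int × Int) (x y size : Int) :
    c ∈ pvRect x y size ↔ pvInR c x y size := by
  obtain ⟨i, j⟩ := c
  unfold pvRect pvBlacks.pvRect pvInR
  rw [List.mem_flatMap]
  constructor
  · rintro ⟨i', hi', hj⟩
    rw [List.mem_map] at hj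
    obtain ⟨j', hj', heq⟩ := hj
    rw [PySem.List.mem_pyRange_one] at hi' hj'
    simp only [Prod.mk.injEq] at heq
    obtain ⟨h5, h6⟩ := heq
    subst h5; subst h6
    exact ⟨hi'.1, hi'.2, hj'.1, hj'.2⟩
  · rintro ⟨h1, h2, h3, h4⟩
    refine ⟨i, ?_, ?_⟩
    · rw [PySem.List.mem_pyRange_one]; exact ⟨h1, h2⟩
    · rw [List.mem_map]
      exact ⟨j, by rw [PySem.List.mem_pyRange_one]; exact ⟨h3, h4⟩, rfl⟩

lemma pvGet2_eq (g : List (List Int)) (hrows : ∀ row ∈ g, row.length = 32)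
    (i j : Int) (hi0 : 0 ≤ i) (hiN : i.toNat < g.length) (hj0 : 0 ≤ j) (hj1 : j < 32) :
    pvGet2 g i j = (g[i.toNat]'hiN)[j.toNat]'(by
      have := hrows _ (List.getElem_mem hiN); omega) := by
  have hjN : j.toNat < (g[i.toNat]'hiN).length := by
    have := hrows _ (List.getElem_mem hiN); omega
  unfold pvGet2
  rw [PySem.List.pyGet?_of_nonneg _ hi0, List.getElem?_eq_getElem hiN]
  simp only [Option.bind]
  rw [PySem.List.pyGet?_of_nonneg _ hj0, List.getElem?_eq_getElem hjN]
  simp only [Option.getD_some]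

lemma pvSet2_spec (g : List (List Int)) (i j v : Int) (hg : pvWF g)
    (hij : pvValid i j) :
    ∃ g', pvSet2? g i j v = some g' ∧ pvWF g' ∧
      ∀ i' j', pvValid i' j' →
        pvGet2 g' i' j' = if i' = i ∧ j' = j then v else pvGet2 g i' j' := by
  obtain ⟨hlen, hrows⟩ := hg
  obtain ⟨hi0, hi1, hj0, hj1⟩ := hij
  have hiN : i.toNat < g.length := by omega
  have hrowlen : g[i.toNat].length = 32 := hrows _ (List.getElem_mem hiN)
  have hjN : j.toNat < g[i.toNat].length := by omega
  have hci : ((i.toNat : Nat) : Int) = i := Int.toNat_of_nonneg hi0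
  have hcj : ((j.toNat : Nat) : Int) = j := Int.toNat_of_nonneg hj0
  have hget : PySem.List.pyGet? g i = some g[i.toNat] := by
    rw [PySem.List.pyGet?_of_nonneg _ hi0, List.getElem?_eq_getElem hiN]
  have hsetrow : PySem.List.pySet? g[i.toNat] j v = some (g[i.toNat].set j.toNat v) := by
    conv_lhs => rw [← hcj]
    exact PySem.List.pySet?_natCast _ _ _ hjN
  have hsetg : ∀ r : List Int, PySem.List.pySet? g i r = some (g.set i.toNat r) := by
    intro r
    conv_lhs => rw [← hci]
    exact PySem.List.pySet?_natCast _ _ _ hiN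
  have hrows' : ∀ row ∈ g.set i.toNat (g[i.toNat].set j.toNat v), row.length = 32 := by
    intro row hrow
    rcases List.mem_or_eq_of_mem_set hrow with h | h
    · exact hrows _ h
    · subst h; simp [hrowlen]
  refine ⟨g.set i.toNat (g[i.toNat].set j.toNat v), ?_, ⟨by simp [hlen], hrows'⟩, ?_⟩
  · simp only [pvSet2?, hget, hsetrow, hsetg]
  · intro i' j' hv
    obtain ⟨hi0', hi1', hj0', hj1'⟩ := hv
    have hiN' : i'.toNat < (g.set i.toNat (g[i.toNat].set j.toNat v)).length := by
      simp [hlen]; omega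
    have hiN'' : i'.toNat < g.length := by omega
    rw [pvGet2_eq _ hrows' i' j' hi0' hiN' hj0' hj1',
        pvGet2_eq g hrows i' j' hi0' hiN'' hj0' hj1']
    by_cases hii : i' = i
    · subst hii
      by_cases hjj : j' = j
      · subst hjj
        simp [List.getElem_set]
      · have hne : j.toNat ≠ j'.toNat := by omega
        simp [List.getElem_set, hjj, hne]
    · have hne : i.toNat ≠ i'.toNat := by omega
      simp [List.getElem_set, hii, hne]

lemma pvFillRow_spec (i v : Int) : ∀ (js : List Int) (g : List (List Int)),
    pvWF g → (∀ j ∈ js, pvValid i j) →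
    ∃ g', pvFillRow g i js v = some g' ∧ pvWF g' ∧
      ∀ i' j', pvValid i' j' →
        pvGet2 g' i' j' = if i' = i ∧ j' ∈ js then v else pvGet2 g i' j' := by
  intro js
  induction js with
  | nil => intro g hg _; exact ⟨g, rfl, hg, by intro i' j' _; simp [pvFillRow]⟩
  | cons j rest ih =>
    intro g hg hvalid
    obtain ⟨g1, hs, hg1, hpt1⟩ := pvSet2_spec g i j v hg (hvalid j (by simp))
    obtain ⟨g', hf, hg', hpt⟩ := ih g1 hg1 (fun j' hj' => hvalid j' (by simp [hj']))
    refine ⟨g', ?_, hg', ?_⟩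
    · simp [pvFillRow, hs, hf]
    · intro i' j' hv
      rw [hpt i' j' hv, hpt1 i' j' hv]
      by_cases h1 : i' = i
      · subst h1
        by_cases h2 : j' ∈ rest
        · simp [h2]
        · by_cases h3 : j' = j <;> simp [h2, h3]
      · simp [h1]

lemma pvFillRect_spec (y size v : Int) : ∀ (is : List Int) (g : List (List Int)),
    pvWF g → (∀ i ∈ is, ∀ j : Int, y ≤ j → j < y + size → pvValid i j) →
    ∃ g', pvFillRect g is y size v = some g' ∧ pvWF g' ∧
      ∀ i' j', pvValid i' j' →
        pvGet2 g' i' j' = if i' ∈ is ∧ y ≤ j' ∧ j' < y + size then v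
          else pvGet2 g i' j' := by
  intro is
  induction is with
  | nil => intro g hg _; exact ⟨g, rfl, hg, by intro i' j' _; simp [pvFillRect]⟩
  | cons i rest ih =>
    intro g hg hvalid
    obtain ⟨g1, hrow, hg1, hpt1⟩ := pvFillRow_spec i v (PySem.List.pyRange y (y + size) 1) g hg
      (by intro j hj; rw [PySem.List.mem_pyRange_one] at hj
          exact hvalid i (by simp) j hj.1 hj.2)
    obtain ⟨g', hf, hg', hpt⟩ := ih g1 hg1 (fun i' hi' => hvalid i' (by simp [hi']))
    refine ⟨g', ?_, hg', ?_⟩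
    · simp [pvFillRect, hrow, hf]
    · intro i' j' hv
      rw [hpt i' j' hv, hpt1 i' j' hv]
      simp only [PySem.List.mem_pyRange_one, List.mem_cons]
      by_cases h1 : i' ∈ rest ∧ y ≤ j' ∧ j' < y + size
      · simp [h1, h1.1, h1.2.1, h1.2.2]
      · by_cases h2 : i' = i ∧ y ≤ j' ∧ j' < y + size
        · simp [h2.1, h2.2.1, h2.2.2, h1]
        · have h3 : ¬ ((i' = i ∨ i' ∈ rest) ∧ y ≤ j' ∧ j' < y + size) := by tauto
          simp [h1, h2, h3]

lemma pvHalf (size : Int) :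
    PySem.Int.floordiv size 2 + PySem.Int.floordiv size 2 ≤ size := by
  have h1 := PySem.Int.floordiv_mul_add_mod size 2
  have h2 := PySem.Int.mod_nonneg size (by norm_num : (0:Int) < 2)
  omega

lemma pvHalfNonneg (size : Int) (hs : 0 ≤ size) :
    0 ≤ PySem.Int.floordiv size 2 := by
  have h1 := PySem.Int.floordiv_mul_add_mod size 2
  have h2 := PySem.Int.mod_nonneg size (by norm_num : (0:Int) < 2)
  have h3 := PySem.Int.mod_lt size (by norm_num : (0:Int) < 2)
  omega

lemma pvNotMem {S : PySem.Set (Int × Int)} {x1 y1 h : Int}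
    (hS : ∀ c ∈ S, pvInR c x1 y1 h) (c : Int × Int) {x2 y2 : Int}
    (hc : pvInR c x2 y2 h)
    (hsep : x1 + h ≤ x2 ∨ x2 + h ≤ x1 ∨ y1 + h ≤ y2 ∨ y2 + h ≤ y1) : c ∉ S := by
  intro hmem
  have h1 := hS c hmem
  unfold pvInR at h1 hc
  omega

-- length of the union: disjoint parts add up
lemma pvLenUnionDisjoint (S T : PySem.Set (Int × Int)) (hT : T.Nodup)
    (hdis : ∀ c ∈ T, c ∉ S) :
    PySem.Set.len (PySem.Set.union S T) = PySem.Set.len S + PySem.Set.len T := by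
  show PySem.Set.len (PySem.Set.update S T) = _
  rw [PySem.Set.update_eq_append_of_disjoint S T hT hdis]
  simp [PySem.Set.len]

lemma pvUnionEmptyLeft (S : PySem.Set (Int × Int)) (hS : S.Nodup) :
    PySem.Set.union PySem.Set.empty S = S :=
  PySem.Set.ofList_eq_self_of_nodup S hS

-- absorbing union: a subset adds nothing
lemma pvUnionSubset (S T : PySem.Set (Int × Int)) (hsub : ∀ c ∈ T, c ∈ S) :
    PySem.Set.union S T = S := by
  show PySem.Set.update S T = S
  rw [PySem.Set.update_eq_append_filter]
  have hnil : List.filter (fun y => !S.contains y) (PySem.Set.ofList T) = [] := by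
    rw [List.filter_eq_nil_iff]
    intro c hc
    have hcT : c ∈ T := by rw [PySem.Set.mem_ofList] at hc; exact hc
    simp
    exact hsub c hcT
  rw [hnil, List.append_nil]

-- two nodup sets with the same members have the same size
lemma pvLenEqOfMemIff (S T : PySem.Set (Int × Int)) (hS : S.Nodup) (hT : T.Nodup)
    (h : ∀ c, c ∈ S ↔ c ∈ T) : PySem.Set.len S = PySem.Set.len T := by
  have hp : S.Perm T := (List.perm_ext_iff_of_nodup hS hT).mpr h
  simp [PySem.Set.len, hp.length_eq]

-- size of the 4-quadrant union
lemma pvLenU4 (S1 S2 S3 S4 : PySem.Set (Int × Int)) (x y h : Int)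
    (hnd1 : S1.Nodup) (hnd2 : S2.Nodup) (hnd3 : S3.Nodup) (hnd4 : S4.Nodup)
    (hs1 : ∀ c ∈ S1, pvInR c x (y + h) h) (hs2 : ∀ c ∈ S2, pvInR c x y h)
    (hs3 : ∀ c ∈ S3, pvInR c (x + h) y h) (hs4 : ∀ c ∈ S4, pvInR c (x + h) (y + h) h) :
    PySem.Set.len (PySem.Set.union (PySem.Set.union (PySem.Set.union
        (PySem.Set.union PySem.Set.empty S1) S2) S3) S4)
      = PySem.Set.len S1 + PySem.Set.len S2 + PySem.Set.len S3 + PySem.Set.len S4 := by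
  rw [pvUnionEmptyLeft S1 hnd1]
  have d2 : ∀ c ∈ S2, c ∉ S1 := fun c hc => pvNotMem hs1 c (hs2 c hc) (by omega)
  have d3 : ∀ c ∈ S3, c ∉ PySem.Set.union S1 S2 := by
    intro c hc
    rw [PySem.Set.mem_union]
    push_neg
    exact ⟨pvNotMem hs1 c (hs3 c hc) (by omega), pvNotMem hs2 c (hs3 c hc) (by omega)⟩
  have d4 : ∀ c ∈ S4, c ∉ PySem.Set.union (PySem.Set.union S1 S2) S3 := by
    intro c hc
    rw [PySem.Set.mem_union, PySem.Set.mem_union]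
    push_neg
    exact ⟨⟨pvNotMem hs1 c (hs4 c hc) (by omega), pvNotMem hs2 c (hs4 c hc) (by omega)⟩,
      pvNotMem hs3 c (hs4 c hc) (by omega)⟩
  rw [pvLenUnionDisjoint _ S4 hnd4 d4, pvLenUnionDisjoint _ S3 hnd3 d3,
      pvLenUnionDisjoint _ S2 hnd2 d2]

lemma pvRectNodup (x y size : Int) : (pvRect x y size).Nodup := by
  unfold pvRect pvBlacks.pvRect
  rw [List.nodup_flatMap]
  constructor
  · intro i _
    refine List.Nodup.map ?_ (by exact PySem.List.nodup_pyRange_one ..)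
    intro a b hab
    simpa using congrArg Prod.snd hab
  · apply List.Pairwise.imp ?_ (by exact PySem.List.pairwise_lt_pyRange_one ..)
    intro a b hab
    intro c hc1 hc2
    rw [List.mem_map] at hc1 hc2
    obtain ⟨j1, _, rfl⟩ := hc1
    obtain ⟨j2, _, he⟩ := hc2
    have : b = a := congrArg Prod.fst he
    omega

lemma pvRectLen (x y size : Int) (hs : 0 ≤ size) :
    ((pvRect x y size).length : Int) = size * size := by
  unfold pvRect pvBlacks.pvRect
  rw [List.length_flatMap]
  have hmap : ∀ i ∈ PySem.List.pyRange x (x + size) 1,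
      ((PySem.List.pyRange y (y + size) 1).map (fun j => (i, j))).length = size.toNat := by
    intro i _
    rw [List.length_map, PySem.List.length_pyRange_one]
    omega
  rw [List.map_congr_left hmap]
  rw [List.map_const', List.sum_replicate, PySem.List.length_pyRange_one]
  have h1 : (x + size - x).toNat = size.toNat := by omega
  rw [h1, smul_eq_mul]
  push_cast [Int.toNat_of_nonneg hs]
  ring

-- the main invariant: A's painter and the set semantics agree, for ANY sufficient fuel
lemma pvMain : ∀ (fuel : Nat) (q : List Char) (x y size : Int) (g : List (List Int)),
    q.length ≤ fuel →
    (∃ n, pvOk q (n + 1) = true) →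
    pvWF g →
    (∀ c : Int × Int, pvInR c x y size → pvValid c.1 c.2) →
    (∀ c : Int × Int, pvInR c x y size → pvGet2 g c.1 c.2 = 0) →
    ∃ r S g',
      pvMakePixel fuel q x y size g = some (r, g') ∧
      (∀ f, q.length ≤ f → pvBlacks f q x y size = some (r, S)) ∧
      r.length < q.length ∧
      (∀ m, pvOk q (m + 1) = true → pvOk r m = true) ∧
      pvWF g' ∧
      S.Nodup ∧
      (∀ c ∈ S, pvInR c x y size) ∧
      (∀ i j, pvValid i j → pvGet2 g' i j = if (i, j) ∈ S then 1 else pvGet2 g i j) := by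
  intro fuel
  induction fuel with
  | zero =>
    intro q x y size g hf hq _ _ _
    obtain ⟨n, hn⟩ := hq
    have hq0 : q = [] := List.length_eq_zero_iff.mp (by omega)
    subst hq0; simp [pvOk] at hn
  | succ fuel ih =>
    intro q x y size g hf hq hg hreg hzero
    obtain ⟨n, hn⟩ := hq
    match q with
    | [] => simp [pvOk] at hn
    | s :: q1 =>
      by_cases hp : s = 'p'
      · -- the 'p' branch
        subst hp
        simp only [pvOk, if_pos rfl] at hn
        set h := PySem.Int.floordiv size 2 with hh
        have hhalf : h + h ≤ size := pvHalf size
        have sub1 : ∀ c : Int × Int, pvInR c x (y + h) h → pvInR c x y size := by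
          rintro ⟨i, j⟩ ⟨a1, a2, a3, a4⟩; exact ⟨by omega, by omega, by omega, by omega⟩
        have sub2 : ∀ c : Int × Int, pvInR c x y h → pvInR c x y size := by
          rintro ⟨i, j⟩ ⟨a1, a2, a3, a4⟩; exact ⟨by omega, by omega, by omega, by omega⟩
        have sub3 : ∀ c : Int × Int, pvInR c (x + h) y h → pvInR c x y size := by
          rintro ⟨i, j⟩ ⟨a1, a2, a3, a4⟩; exact ⟨by omega, by omega, by omega, by omega⟩
        have sub4 : ∀ c : Int × Int, pvInR c (x + h) (y + h) h → pvInR c x y size := by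
          rintro ⟨i, j⟩ ⟨a1, a2, a3, a4⟩; exact ⟨by omega, by omega, by omega, by omega⟩
        -- child 1
        obtain ⟨q2, S1, g1, hA1, hB1, hl1, hok1, hg1, hnd1, hsub1, hpt1⟩ :=
          ih q1 x (y + h) h g (by simp at hf; omega) ⟨n + 3, hn⟩ hg
            (fun c hc => hreg c (sub1 c hc)) (fun c hc => hzero c (sub1 c hc))
        -- child 2
        have hz2 : ∀ c : Int × Int, pvInR c x y h → pvGet2 g1 c.1 c.2 = 0 := by
          intro c hc
          have hv : pvValid c.1 c.2 := hreg c (sub2 c hc)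
          rw [hpt1 c.1 c.2 hv]
          have hn1 : (c.1, c.2) ∉ S1 := pvNotMem hsub1 (c.1, c.2) hc (by omega)
          simp [hn1]; exact hzero c (sub2 c hc)
        obtain ⟨q3, S2, g2, hA2, hB2, hl2, hok2, hg2, hnd2, hsub2, hpt2⟩ :=
          ih q2 x y h g1 (by simp at hf; omega) ⟨n + 2, hok1 (n + 3) hn⟩ hg1
            (fun c hc => hreg c (sub2 c hc)) hz2
        -- child 3
        have hz3 : ∀ c : Int × Int, pvInR c (x + h) y h → pvGet2 g2 c.1 c.2 = 0 := by
          intro c hc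
          have hv : pvValid c.1 c.2 := hreg c (sub3 c hc)
          rw [hpt2 c.1 c.2 hv, hpt1 c.1 c.2 hv]
          have hn1 : (c.1, c.2) ∉ S1 := pvNotMem hsub1 (c.1, c.2) hc (by omega)
          have hn2 : (c.1, c.2) ∉ S2 := pvNotMem hsub2 (c.1, c.2) hc (by omega)
          simp [hn1, hn2]; exact hzero c (sub3 c hc)
        obtain ⟨q4, S3, g3, hA3, hB3, hl3, hok3, hg3, hnd3, hsub3, hpt3⟩ :=
          ih q3 (x + h) y h g2 (by simp at hf; omega) ⟨n + 1, hok2 (n + 2) (hok1 (n + 3) hn)⟩ hg2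
            (fun c hc => hreg c (sub3 c hc)) hz3
        -- child 4
        have hz4 : ∀ c : Int × Int, pvInR c (x + h) (y + h) h → pvGet2 g3 c.1 c.2 = 0 := by
          intro c hc
          have hv : pvValid c.1 c.2 := hreg c (sub4 c hc)
          rw [hpt3 c.1 c.2 hv, hpt2 c.1 c.2 hv, hpt1 c.1 c.2 hv]
          have hn1 : (c.1, c.2) ∉ S1 := pvNotMem hsub1 (c.1, c.2) hc (by omega)
          have hn2 : (c.1, c.2) ∉ S2 := pvNotMem hsub2 (c.1, c.2) hc (by omega)
          have hn3 : (c.1, c.2) ∉ S3 := pvNotMem hsub3 (c.1, c.2) hc (by omega)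
          simp [hn1, hn2, hn3]; exact hzero c (sub4 c hc)
        obtain ⟨q5, S4, g4, hA4, hB4, hl4, hok4, hg4, hnd4, hsub4, hpt4⟩ :=
          ih q4 (x + h) (y + h) h g3 (by simp at hf; omega)
            ⟨n, hok3 (n + 1) (hok2 (n + 2) (hok1 (n + 3) hn))⟩ hg3
            (fun c hc => hreg c (sub4 c hc)) hz4
        refine ⟨q5, PySem.Set.union (PySem.Set.union (PySem.Set.union
          (PySem.Set.union PySem.Set.empty S1) S2) S3) S4, g4, ?_, ?_,
          by simp; omega, ?_, hg4, ?_, ?_, ?_⟩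
        · simp only [pvMakePixel, if_true]
          rw [← hh]
          simp only [hA1, hA2, hA3, hA4]
        · intro f hf'
          match f with
          | 0 => simp at hf'
          | Nat.succ f =>
            have e1 : q1.length ≤ f := by simp at hf'; omega
            simp only [pvBlacks, if_true]
            rw [← hh]
            simp only [hB1 f e1, hB2 f (by omega), hB3 f (by omega), hB4 f (by omega)]
        · intro m hm
          simp only [pvOk, if_pos rfl] at hm
          exact hok4 m (hok3 (m + 1) (hok2 (m + 2) (hok1 (m + 3) hm)))
        · exact PySem.Set.nodup_union _ _ (PySem.Set.nodup_union _ _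
            (PySem.Set.nodup_union _ _ (PySem.Set.nodup_union _ _ List.nodup_nil)))
        · intro c hc
          simp only [PySem.Set.mem_union] at hc
          rcases hc with (((hc | hc) | hc) | hc) | hc
          · simp [PySem.Set.empty] at hc
          · exact sub1 c (hsub1 c hc)
          · exact sub2 c (hsub2 c hc)
          · exact sub3 c (hsub3 c hc)
          · exact sub4 c (hsub4 c hc)
        · intro i j hv
          rw [hpt4 i j hv, hpt3 i j hv, hpt2 i j hv, hpt1 i j hv]
          simp only [PySem.Set.mem_union]
          by_cases h4 : (i, j) ∈ S4
          · simp [h4]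
          · by_cases h3 : (i, j) ∈ S3
            · have n2 : (i, j) ∉ S2 := pvNotMem hsub2 (i, j) (hsub3 _ h3) (by omega)
              have n1 : (i, j) ∉ S1 := pvNotMem hsub1 (i, j) (hsub3 _ h3) (by omega)
              simp [h3, h4]
            · by_cases h2 : (i, j) ∈ S2
              · have n1 : (i, j) ∉ S1 := pvNotMem hsub1 (i, j) (hsub2 _ h2) (by omega)
                simp [h2, h3, h4]
              · by_cases h1 : (i, j) ∈ S1
                · simp [h1, h2, h3, h4]
                · simp [h1, h2, h3, h4, PySem.Set.empty]
      · -- leaf branches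
        have hok : ∀ m, pvOk (s :: q1) (m + 1) = true → pvOk q1 m = true := by
          intro m hm; simpa [pvOk, hp] using hm
        have hlen : q1.length < (s :: q1).length := by simp
        by_cases hw : s = 'w'
        · subst hw
          obtain ⟨g', hfill, hg', hpt⟩ := pvFillRect_spec y size 0
            (PySem.List.pyRange x (x + size) 1) g hg
            (by intro i hi j hj1 hj2
                rw [PySem.List.mem_pyRange_one] at hi
                exact hreg (i, j) ⟨hi.1, hi.2, hj1, hj2⟩)
          have hne1 : ¬ ('w' : Char) = 'p' := by decide
          have hne2 : ¬ ('w' : Char) = 'b' := by decide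
          refine ⟨q1, PySem.Set.empty, g', ?_, ?_, hlen, hok, hg', List.nodup_nil, ?_, ?_⟩
          · simp [pvMakePixel, hne1, hfill]
          · intro f hf'
            match f with
            | 0 => simp at hf'
            | Nat.succ f => simp [pvBlacks, hne1, hne2]
          · intro c hc; simp [PySem.Set.empty] at hc
          · intro i j hv
            rw [hpt i j hv]
            simp only [PySem.Set.empty, List.not_mem_nil, if_false, PySem.List.mem_pyRange_one]
            split_ifs with hin
            · exact (hzero (i, j) ⟨hin.1.1, hin.1.2, hin.2.1, hin.2.2⟩).symm
            · rfl
        · by_cases hb : s = 'b'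
          · subst hb
            obtain ⟨g', hfill, hg', hpt⟩ := pvFillRect_spec y size 1
              (PySem.List.pyRange x (x + size) 1) g hg
              (by intro i hi j hj1 hj2
                  rw [PySem.List.mem_pyRange_one] at hi
                  exact hreg (i, j) ⟨hi.1, hi.2, hj1, hj2⟩)
            have hne1 : ¬ ('b' : Char) = 'p' := by decide
            have hne2 : ¬ ('b' : Char) = 'w' := by decide
            refine ⟨q1, PySem.Set.ofList (pvRect x y size), g', ?_, ?_, hlen, hok, hg',
              PySem.Set.nodup_ofList _, ?_, ?_⟩
            · simp [pvMakePixel, hne1, hne2, hfill]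
            · intro f hf'
              match f with
              | 0 => simp at hf'
              | Nat.succ f => simp [pvBlacks, hne1, pvRect]
            · intro c hc
              rw [PySem.Set.mem_ofList] at hc
              exact (pvMemRect c x y size).mp hc
            · intro i j hv
              rw [hpt i j hv]
              simp only [PySem.Set.mem_ofList, pvMemRect, pvInR, PySem.List.mem_pyRange_one]
              split_ifs with h1 h2 <;> first | rfl | tauto
          · refine ⟨q1, PySem.Set.empty, g, ?_, ?_, hlen, hok, hg, List.nodup_nil, ?_, ?_⟩
            · simp [pvMakePixel, hp, hw, hb]
            · intro f hf'
              match f with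
              | 0 => simp at hf'
              | Nat.succ f => simp [pvBlacks, hp, hb]
            · intro c hc; simp [PySem.Set.empty] at hc
            · intro i j hv; simp [PySem.Set.empty]

lemma pvWFInit : pvWF pvInit := by
  constructor
  · simp [pvInit]
  · intro row hrow
    rw [pvInit] at hrow
    rw [List.eq_of_mem_replicate hrow]
    simp

lemma pvGet2Init (i j : Int) : pvGet2 pvInit i j = 0 := by
  unfold pvGet2 pvInit
  cases hrow : PySem.List.pyGet? (List.replicate 32 (List.replicate 32 (0:Int))) i with
  | none => rfl
  | some row =>
    have hmem : row ∈ List.replicate 32 (List.replicate 32 (0:Int)) :=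
      PySem.List.mem_of_pyGet?_eq_some _ hrow
    rw [List.eq_of_mem_replicate hmem]
    simp only [Option.bind]
    cases hv : PySem.List.pyGet? (List.replicate 32 (0:Int)) j with
    | none => rfl
    | some v =>
      have hm2 : v ∈ List.replicate 32 (0:Int) := PySem.List.mem_of_pyGet?_eq_some _ hv
      rw [List.eq_of_mem_replicate hm2]
      rfl

-- B's one-subtree counter computes the size of the subtree's black set
lemma pvCountMain : ∀ (fuel : Nat) (q : List Char) (x y size : Int),
    q.length ≤ fuel → (∃ m, pvOk q (m + 1) = true) →
    (∀ c : Int × Int, pvInR c x y size → pvValid c.1 c.2) → 0 ≤ size →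
    ∃ r S,
      (∀ f, q.length ≤ f → pvBlacks f q x y size = some (r, S)) ∧
      r.length < q.length ∧
      (∀ m, pvOk q (m + 1) = true → pvOk r m = true) ∧
      S.Nodup ∧
      (∀ c ∈ S, pvInR c x y size) ∧
      (∀ f, q.length ≤ f → pvCountOne f q size = some (r, PySem.Set.len S)) := by
  intro fuel
  induction fuel with
  | zero =>
    intro q x y size hf hq _ _
    obtain ⟨n, hn⟩ := hq
    have hq0 : q = [] := List.length_eq_zero_iff.mp (by omega)
    subst hq0; simp [pvOk] at hn
  | succ fuel ih =>
    intro q x y size hf hq hreg hs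
    obtain ⟨n, hn⟩ := hq
    match q with
    | [] => simp [pvOk] at hn
    | s :: q1 =>
      by_cases hp : s = 'p'
      · subst hp
        simp only [pvOk, if_pos rfl] at hn
        set h := PySem.Int.floordiv size 2 with hh
        have hhalf : h + h ≤ size := pvHalf size
        have hh0 : 0 ≤ h := pvHalfNonneg size hs
        have sub1 : ∀ c : Int × Int, pvInR c x (y + h) h → pvInR c x y size := by
          rintro ⟨i, j⟩ ⟨a1, a2, a3, a4⟩; exact ⟨by omega, by omega, by omega, by omega⟩
        have sub2 : ∀ c : Int × Int, pvInR c x y h → pvInR c x y size := by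
          rintro ⟨i, j⟩ ⟨a1, a2, a3, a4⟩; exact ⟨by omega, by omega, by omega, by omega⟩
        have sub3 : ∀ c : Int × Int, pvInR c (x + h) y h → pvInR c x y size := by
          rintro ⟨i, j⟩ ⟨a1, a2, a3, a4⟩; exact ⟨by omega, by omega, by omega, by omega⟩
        have sub4 : ∀ c : Int × Int, pvInR c (x + h) (y + h) h → pvInR c x y size := by
          rintro ⟨i, j⟩ ⟨a1, a2, a3, a4⟩; exact ⟨by omega, by omega, by omega, by omega⟩
        obtain ⟨r1, S1, hB1, hl1, hok1, hnd1, hsub1, hC1⟩ :=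
          ih q1 x (y + h) h (by simp at hf; omega) ⟨n + 3, hn⟩
            (fun c hc => hreg c (sub1 c hc)) hh0
        obtain ⟨r2, S2, hB2, hl2, hok2, hnd2, hsub2, hC2⟩ :=
          ih r1 x y h (by simp at hf; omega) ⟨n + 2, hok1 (n + 3) hn⟩
            (fun c hc => hreg c (sub2 c hc)) hh0
        obtain ⟨r3, S3, hB3, hl3, hok3, hnd3, hsub3, hC3⟩ :=
          ih r2 (x + h) y h (by simp at hf; omega)
            ⟨n + 1, hok2 (n + 2) (hok1 (n + 3) hn)⟩
            (fun c hc => hreg c (sub3 c hc)) hh0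
        obtain ⟨r4, S4, hB4, hl4, hok4, hnd4, hsub4, hC4⟩ :=
          ih r3 (x + h) (y + h) h (by simp at hf; omega)
            ⟨n, hok3 (n + 1) (hok2 (n + 2) (hok1 (n + 3) hn))⟩
            (fun c hc => hreg c (sub4 c hc)) hh0
        refine ⟨r4, PySem.Set.union (PySem.Set.union (PySem.Set.union
          (PySem.Set.union PySem.Set.empty S1) S2) S3) S4, ?_, by simp; omega, ?_, ?_, ?_, ?_⟩
        · intro f hf'
          match f with
          | 0 => simp at hf'
          | Nat.succ f =>
            have e1 : q1.length ≤ f := by simp at hf'; omega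
            simp only [pvBlacks, if_true]
            rw [← hh]
            simp only [hB1 f e1, hB2 f (by omega), hB3 f (by omega), hB4 f (by omega)]
        · intro m hm
          simp only [pvOk, if_pos rfl] at hm
          exact hok4 m (hok3 (m + 1) (hok2 (m + 2) (hok1 (m + 3) hm)))
        · exact PySem.Set.nodup_union _ _ (PySem.Set.nodup_union _ _
            (PySem.Set.nodup_union _ _ (PySem.Set.nodup_union _ _ List.nodup_nil)))
        · intro c hc
          simp only [PySem.Set.mem_union] at hc
          rcases hc with (((hc | hc) | hc) | hc) | hc
          · simp [PySem.Set.empty] at hc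
          · exact sub1 c (hsub1 c hc)
          · exact sub2 c (hsub2 c hc)
          · exact sub3 c (hsub3 c hc)
          · exact sub4 c (hsub4 c hc)
        · intro f hf'
          match f with
          | 0 => simp at hf'
          | Nat.succ f =>
            have e1 : q1.length ≤ f := by simp at hf'; omega
            simp only [pvCountOne, if_true]
            rw [← hh]
            simp only [hC1 f e1, hC2 f (by omega), hC3 f (by omega), hC4 f (by omega)]
            rw [pvLenU4 S1 S2 S3 S4 x y h hnd1 hnd2 hnd3 hnd4 hsub1 hsub2 hsub3 hsub4]
      · have hok : ∀ m, pvOk (s :: q1) (m + 1) = true → pvOk q1 m = true := by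
          intro m hm; simpa [pvOk, hp] using hm
        have hlen : q1.length < (s :: q1).length := by simp
        by_cases hb : s = 'b'
        · subst hb
          have hne1 : ¬ ('b' : Char) = 'p' := by decide
          refine ⟨q1, PySem.Set.ofList (pvRect x y size), ?_, hlen, hok,
            PySem.Set.nodup_ofList _, ?_, ?_⟩
          · intro f hf'
            match f with
            | 0 => simp at hf'
            | Nat.succ f => simp [pvBlacks, hne1, pvRect]
          · intro c hc
            rw [PySem.Set.mem_ofList] at hc
            exact (pvMemRect c x y size).mp hc
          · intro f hf'
            match f with
            | 0 => simp at hf'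
            | Nat.succ f =>
              simp only [pvCountOne, hne1, if_false, if_true]
              rw [PySem.Set.ofList_eq_self_of_nodup _ (pvRectNodup x y size)]
              rw [show PySem.Set.len (pvRect x y size) = ((pvRect x y size).length : Int)
                    from rfl,
                  pvRectLen x y size hs]
        · refine ⟨q1, PySem.Set.empty, ?_, hlen, hok, List.nodup_nil, ?_, ?_⟩
          · intro f hf'
            match f with
            | 0 => simp at hf'
            | Nat.succ f => simp [pvBlacks, hp, hb]
          · intro c hc; simp [PySem.Set.empty] at hc
          · intro f hf'
            match f with
            | 0 => simp at hf'
            | Nat.succ f => simp [pvCountOne, hp, hb, PySem.Set.len, PySem.Set.empty]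

-- B's parallel merge computes the size of the union of the two black sets
lemma pvMergeMain : ∀ (fuel : Nat) (qa qb : List Char) (x y size : Int),
    qa.length ≤ fuel → qb.length ≤ fuel →
    (∃ m, pvOk qa (m + 1) = true) → (∃ m, pvOk qb (m + 1) = true) →
    (∀ c : Int × Int, pvInR c x y size → pvValid c.1 c.2) → 0 ≤ size →
    ∃ ra Sa rb Sb,
      (∀ f, qa.length ≤ f → pvBlacks f qa x y size = some (ra, Sa)) ∧
      ra.length < qa.length ∧ (∀ m, pvOk qa (m + 1) = true → pvOk ra m = true) ∧
      Sa.Nodup ∧ (∀ c ∈ Sa, pvInR c x y size) ∧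
      (∀ f, qb.length ≤ f → pvBlacks f qb x y size = some (rb, Sb)) ∧
      rb.length < qb.length ∧ (∀ m, pvOk qb (m + 1) = true → pvOk rb m = true) ∧
      Sb.Nodup ∧ (∀ c ∈ Sb, pvInR c x y size) ∧
      (∀ f, qa.length ≤ f → qb.length ≤ f →
        pvMerge f qa qb size = some (ra, rb, PySem.Set.len (PySem.Set.union Sa Sb))) := by
  intro fuel
  induction fuel with
  | zero =>
    intro qa qb x y size hfa hfb hqa _ _ _
    obtain ⟨n, hn⟩ := hqa
    have hq0 : qa = [] := List.length_eq_zero_iff.mp (by omega)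
    subst hq0; simp [pvOk] at hn
  | succ fuel ih =>
    intro qa qb x y size hfa hfb hqa hqb hreg hs
    obtain ⟨na, hna⟩ := hqa
    obtain ⟨nb, hnb⟩ := hqb
    match qa, qb with
    | [], _ => simp [pvOk] at hna
    | _ :: _, [] => simp [pvOk] at hnb
    | sa :: qa1, sb :: qb1 =>
      by_cases hpp : sa = 'p' ∧ sb = 'p'
      · obtain ⟨hpa, hpb⟩ := hpp
        subst hpa; subst hpb
        simp only [pvOk, if_pos rfl] at hna hnb
        set h := PySem.Int.floordiv size 2 with hh
        have hhalf : h + h ≤ size := pvHalf size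
        have hh0 : 0 ≤ h := pvHalfNonneg size hs
        have sub1 : ∀ c : Int × Int, pvInR c x (y + h) h → pvInR c x y size := by
          rintro ⟨i, j⟩ ⟨a1, a2, a3, a4⟩; exact ⟨by omega, by omega, by omega, by omega⟩
        have sub2 : ∀ c : Int × Int, pvInR c x y h → pvInR c x y size := by
          rintro ⟨i, j⟩ ⟨a1, a2, a3, a4⟩; exact ⟨by omega, by omega, by omega, by omega⟩
        have sub3 : ∀ c : Int × Int, pvInR c (x + h) y h → pvInR c x y size := by
          rintro ⟨i, j⟩ ⟨a1, a2, a3, a4⟩; exact ⟨by omega, by omega, by omega, by omega⟩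
        have sub4 : ∀ c : Int × Int, pvInR c (x + h) (y + h) h → pvInR c x y size := by
          rintro ⟨i, j⟩ ⟨a1, a2, a3, a4⟩; exact ⟨by omega, by omega, by omega, by omega⟩
        obtain ⟨ra1, Sa1, rb1, Sb1, hBa1, hla1, hoka1, hnda1, hsuba1,
                hBb1, hlb1, hokb1, hndb1, hsubb1, hM1⟩ :=
          ih qa1 qb1 x (y + h) h (by simp at hfa; omega) (by simp at hfb; omega)
            ⟨na + 3, hna⟩ ⟨nb + 3, hnb⟩ (fun c hc => hreg c (sub1 c hc)) hh0
        obtain ⟨ra2, Sa2, rb2, Sb2, hBa2, hla2, hoka2, hnda2, hsuba2,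
                hBb2, hlb2, hokb2, hndb2, hsubb2, hM2⟩ :=
          ih ra1 rb1 x y h (by simp at hfa; omega) (by simp at hfb; omega)
            ⟨na + 2, hoka1 (na + 3) hna⟩ ⟨nb + 2, hokb1 (nb + 3) hnb⟩
            (fun c hc => hreg c (sub2 c hc)) hh0
        obtain ⟨ra3, Sa3, rb3, Sb3, hBa3, hla3, hoka3, hnda3, hsuba3,
                hBb3, hlb3, hokb3, hndb3, hsubb3, hM3⟩ :=
          ih ra2 rb2 (x + h) y h (by simp at hfa; omega) (by simp at hfb; omega)
            ⟨na + 1, hoka2 (na + 2) (hoka1 (na + 3) hna)⟩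
            ⟨nb + 1, hokb2 (nb + 2) (hokb1 (nb + 3) hnb)⟩
            (fun c hc => hreg c (sub3 c hc)) hh0
        obtain ⟨ra4, Sa4, rb4, Sb4, hBa4, hla4, hoka4, hnda4, hsuba4,
                hBb4, hlb4, hokb4, hndb4, hsubb4, hM4⟩ :=
          ih ra3 rb3 (x + h) (y + h) h (by simp at hfa; omega) (by simp at hfb; omega)
            ⟨na, hoka3 (na + 1) (hoka2 (na + 2) (hoka1 (na + 3) hna))⟩
            ⟨nb, hokb3 (nb + 1) (hokb2 (nb + 2) (hokb1 (nb + 3) hnb))⟩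
            (fun c hc => hreg c (sub4 c hc)) hh0
        set Ua := PySem.Set.union (PySem.Set.union (PySem.Set.union
          (PySem.Set.union PySem.Set.empty Sa1) Sa2) Sa3) Sa4 with hUa
        set Ub := PySem.Set.union (PySem.Set.union (PySem.Set.union
          (PySem.Set.union PySem.Set.empty Sb1) Sb2) Sb3) Sb4 with hUb
        have hBau : ∀ f, (('p' :: qa1).length ≤ f) →
            pvBlacks f ('p' :: qa1) x y size = some (ra4, Ua) := by
          intro f hf'
          match f with
          | 0 => simp at hf'
          | Nat.succ f =>
            have e1 : qa1.length ≤ f := by simp at hf'; omega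
            simp only [pvBlacks, if_true]
            rw [← hh]
            simp only [hBa1 f e1, hBa2 f (by omega), hBa3 f (by omega), hBa4 f (by omega)]
            rfl
        have hBbu : ∀ f, (('p' :: qb1).length ≤ f) →
            pvBlacks f ('p' :: qb1) x y size = some (rb4, Ub) := by
          intro f hf'
          match f with
          | 0 => simp at hf'
          | Nat.succ f =>
            have e1 : qb1.length ≤ f := by simp at hf'; omega
            simp only [pvBlacks, if_true]
            rw [← hh]
            simp only [hBb1 f e1, hBb2 f (by omega), hBb3 f (by omega), hBb4 f (by omega)]
            rfl
        have hndUa : Ua.Nodup := PySem.Set.nodup_union _ _ (PySem.Set.nodup_union _ _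
          (PySem.Set.nodup_union _ _ (PySem.Set.nodup_union _ _ List.nodup_nil)))
        have hndUb : Ub.Nodup := PySem.Set.nodup_union _ _ (PySem.Set.nodup_union _ _
          (PySem.Set.nodup_union _ _ (PySem.Set.nodup_union _ _ List.nodup_nil)))
        have hsubUa : ∀ c ∈ Ua, pvInR c x y size := by
          intro c hc
          rw [hUa] at hc
          simp only [PySem.Set.mem_union] at hc
          rcases hc with (((hc | hc) | hc) | hc) | hc
          · simp [PySem.Set.empty] at hc
          · exact sub1 c (hsuba1 c hc)
          · exact sub2 c (hsuba2 c hc)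
          · exact sub3 c (hsuba3 c hc)
          · exact sub4 c (hsuba4 c hc)
        have hsubUb : ∀ c ∈ Ub, pvInR c x y size := by
          intro c hc
          rw [hUb] at hc
          simp only [PySem.Set.mem_union] at hc
          rcases hc with (((hc | hc) | hc) | hc) | hc
          · simp [PySem.Set.empty] at hc
          · exact sub1 c (hsubb1 c hc)
          · exact sub2 c (hsubb2 c hc)
          · exact sub3 c (hsubb3 c hc)
          · exact sub4 c (hsubb4 c hc)
        refine ⟨ra4, Ua, rb4, Ub, hBau, by simp; omega, ?_, hndUa, hsubUa,
          hBbu, by simp; omega, ?_, hndUb, hsubUb, ?_⟩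
        · intro m hm
          simp only [pvOk, if_pos rfl] at hm
          exact hoka4 m (hoka3 (m + 1) (hoka2 (m + 2) (hoka1 (m + 3) hm)))
        · intro m hm
          simp only [pvOk, if_pos rfl] at hm
          exact hokb4 m (hokb3 (m + 1) (hokb2 (m + 2) (hokb1 (m + 3) hm)))
        · intro f hfa' hfb'
          match f with
          | 0 => simp at hfa'
          | Nat.succ f =>
            have ea : qa1.length ≤ f := by simp at hfa'; omega
            have eb : qb1.length ≤ f := by simp at hfb'; omega
            simp only [pvMerge]
            rw [if_pos (⟨trivial, trivial⟩ : True ∧ True)]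
            rw [← hh]
            simp only [hM1 f ea eb, hM2 f (by omega) (by omega), hM3 f (by omega) (by omega),
                hM4 f (by omega) (by omega)]
            -- the four pairwise unions, one per quadrant
            have hT1 : ∀ c ∈ PySem.Set.union Sa1 Sb1, pvInR c x (y + h) h := by
              intro c hc
              rw [PySem.Set.mem_union] at hc
              rcases hc with hc | hc
              · exact hsuba1 c hc
              · exact hsubb1 c hc
            have hT2 : ∀ c ∈ PySem.Set.union Sa2 Sb2, pvInR c x y h := by
              intro c hc
              rw [PySem.Set.mem_union] at hc
              rcases hc with hc | hc
              · exact hsuba2 c hc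
              · exact hsubb2 c hc
            have hT3 : ∀ c ∈ PySem.Set.union Sa3 Sb3, pvInR c (x + h) y h := by
              intro c hc
              rw [PySem.Set.mem_union] at hc
              rcases hc with hc | hc
              · exact hsuba3 c hc
              · exact hsubb3 c hc
            have hT4 : ∀ c ∈ PySem.Set.union Sa4 Sb4, pvInR c (x + h) (y + h) h := by
              intro c hc
              rw [PySem.Set.mem_union] at hc
              rcases hc with hc | hc
              · exact hsuba4 c hc
              · exact hsubb4 c hc
            have hkey : PySem.Set.len (PySem.Set.union Ua Ub)
                = PySem.Set.len (PySem.Set.union Sa1 Sb1)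
                  + PySem.Set.len (PySem.Set.union Sa2 Sb2)
                  + PySem.Set.len (PySem.Set.union Sa3 Sb3)
                  + PySem.Set.len (PySem.Set.union Sa4 Sb4) := by
              rw [← pvLenU4 (PySem.Set.union Sa1 Sb1) (PySem.Set.union Sa2 Sb2)
                    (PySem.Set.union Sa3 Sb3) (PySem.Set.union Sa4 Sb4) x y h
                    (PySem.Set.nodup_union _ _ hnda1) (PySem.Set.nodup_union _ _ hnda2)
                    (PySem.Set.nodup_union _ _ hnda3) (PySem.Set.nodup_union _ _ hnda4)
                    hT1 hT2 hT3 hT4]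
              apply pvLenEqOfMemIff
              · exact PySem.Set.nodup_union _ _ hndUa
              · exact PySem.Set.nodup_union _ _ (PySem.Set.nodup_union _ _
                  (PySem.Set.nodup_union _ _ (PySem.Set.nodup_union _ _ List.nodup_nil)))
              · intro c
                rw [hUa, hUb]
                simp only [PySem.Set.mem_union, PySem.Set.empty, List.not_mem_nil]
                tauto
            rw [hkey]
      · -- at least one side is a leaf
        obtain ⟨ra, Sa, hBa, hla, hoka, hnda, hsuba, hCa⟩ :=
          pvCountMain (fuel + 1) (sa :: qa1) x y size (by omega) ⟨na, hna⟩ hreg hs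
        obtain ⟨rb, Sb, hBb, hlb, hokb, hndb, hsubb, hCb⟩ :=
          pvCountMain (fuel + 1) (sb :: qb1) x y size (by omega) ⟨nb, hnb⟩ hreg hs
        refine ⟨ra, Sa, rb, Sb, hBa, hla, hoka, hnda, hsuba,
          hBb, hlb, hokb, hndb, hsubb, ?_⟩
        intro f hfa' hfb'
        match f with
        | 0 => simp at hfa'
        | Nat.succ f =>
          have ea : qa1.length + 1 ≤ f + 1 := by simpa using hfa'
          have eb : qb1.length + 1 ≤ f + 1 := by simpa using hfb'
          have hra : pvCountRest f qa1 sa size = some (ra, PySem.Set.len Sa) := by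
            have : pvCountRest f qa1 sa size = pvCountOne (f + 1) (sa :: qa1) size := rfl
            rw [this, hCa (f + 1) (by simpa using hfa')]
          have hrb : pvCountRest f qb1 sb size = some (rb, PySem.Set.len Sb) := by
            have : pvCountRest f qb1 sb size = pvCountOne (f + 1) (sb :: qb1) size := rfl
            rw [this, hCb (f + 1) (by simpa using hfb')]
          simp only [pvMerge, if_neg hpp, hra, hrb]
          have hval : (if sa = 'b' ∨ sb = 'b' then size * size
                else PySem.Set.len Sa + PySem.Set.len Sb)
              = PySem.Set.len (PySem.Set.union Sa Sb) := by
            by_cases hba : sa = 'b'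
            · -- a's subtree is all black: the union is the whole square
              subst hba
              have hSa : Sa = pvRect x y size := by
                have h1 := hBa (qa1.length + 1) (by simp)
                have h2 : pvBlacks (qa1.length + 1) ('b' :: qa1) x y size
                    = some (qa1, PySem.Set.ofList (pvRect x y size)) := by
                  simp [pvBlacks, pvRect]
                rw [h2] at h1
                have := (Option.some.injEq _ _).mp h1.symm
                rw [(Prod.mk.injEq _ _ _ _).mp this |>.2]
                exact PySem.Set.ofList_eq_self_of_nodup _ (pvRectNodup x y size)
              have hsubSb : ∀ c ∈ Sb, c ∈ Sa := by
                intro c hc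
                rw [hSa, pvMemRect]
                exact hsubb c hc
              rw [if_pos (Or.inl rfl), pvUnionSubset Sa Sb hsubSb, hSa,
                  show PySem.Set.len (pvRect x y size) = ((pvRect x y size).length : Int)
                    from rfl, pvRectLen x y size hs]
            · by_cases hbb : sb = 'b'
              · -- b's subtree is all black
                subst hbb
                have hSb : Sb = pvRect x y size := by
                  have h1 := hBb (qb1.length + 1) (by simp)
                  have h2 : pvBlacks (qb1.length + 1) ('b' :: qb1) x y size
                      = some (qb1, PySem.Set.ofList (pvRect x y size)) := by
                    simp [pvBlacks, pvRect]
                  rw [h2] at h1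
                  have := (Option.some.injEq _ _).mp h1.symm
                  rw [(Prod.mk.injEq _ _ _ _).mp this |>.2]
                  exact PySem.Set.ofList_eq_self_of_nodup _ (pvRectNodup x y size)
                have hmem : ∀ c, c ∈ PySem.Set.union Sa Sb ↔ c ∈ Sb := by
                  intro c
                  rw [PySem.Set.mem_union]
                  constructor
                  · rintro (hc | hc)
                    · rw [hSb, pvMemRect]; exact hsuba c hc
                    · exact hc
                  · exact Or.inr
                rw [if_pos (Or.inr rfl),
                    pvLenEqOfMemIff _ Sb (PySem.Set.nodup_union _ _ hnda) hndb hmem, hSb,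
                    show PySem.Set.len (pvRect x y size) = ((pvRect x y size).length : Int)
                      from rfl, pvRectLen x y size hs]
              · -- neither head is 'b' and they are not both 'p': one side is empty
                have hone : Sa = PySem.Set.empty ∨ Sb = PySem.Set.empty := by
                  by_cases hpa : sa = 'p'
                  · have hpb : ¬ sb = 'p' := fun hc => hpp ⟨hpa, hc⟩
                    right
                    have h1 := hBb (qb1.length + 1) (by simp)
                    have h2 : pvBlacks (qb1.length + 1) (sb :: qb1) x y size
                        = some (qb1, PySem.Set.empty) := by
                      simp [pvBlacks, hpb, hbb]
                    rw [h2] at h1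
                    have := (Option.some.injEq _ _).mp h1.symm
                    exact ((Prod.mk.injEq _ _ _ _).mp this).2
                  · left
                    have h1 := hBa (qa1.length + 1) (by simp)
                    have h2 : pvBlacks (qa1.length + 1) (sa :: qa1) x y size
                        = some (qa1, PySem.Set.empty) := by
                      simp [pvBlacks, hpa, hba]
                    rw [h2] at h1
                    have := (Option.some.injEq _ _).mp h1.symm
                    exact ((Prod.mk.injEq _ _ _ _).mp this).2
                have hdis : ∀ c ∈ Sb, c ∉ Sa := by
                  rcases hone with h | h
                  · intro c _ hc; rw [h] at hc; simp [PySem.Set.empty] at hc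
                  · intro c hc; rw [h] at hc; simp [PySem.Set.empty] at hc
                have hne : ¬ (sa = 'b' ∨ sb = 'b') := by tauto
                rw [if_neg hne, pvLenUnionDisjoint Sa Sb hndb hdis]
          rw [hval]

lemma pvCountRowEq (ga gb : List (List Int)) (U : PySem.Set (Int × Int)) (i : Int)
    (hcond : ∀ j : Int, pvValid i j →
      (pvGet2 ga i j == 1 || pvGet2 gb i j == 1) = decide ((i, j) ∈ U)) :
    ∀ (js : List Int) (cnt : Int), (∀ j ∈ js, pvValid i j) →
      pvCountRow ga gb i js cnt = cnt + (js.countP (fun j => decide ((i, j) ∈ U)) : Int) := by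
  intro js
  induction js with
  | nil => intro cnt _; simp [pvCountRow]
  | cons j rest ih =>
    intro cnt hvalid
    rw [pvCountRow, hcond j (hvalid j (by simp)), ih _ (fun j' hj' => hvalid j' (by simp [hj']))]
    rw [List.countP_cons]
    by_cases hm : (i, j) ∈ U <;> simp [hm] <;> push_cast <;> ring

lemma pvCountGridEq (ga gb : List (List Int)) (U : PySem.Set (Int × Int))
    (hcond : ∀ i j : Int, pvValid i j →
      (pvGet2 ga i j == 1 || pvGet2 gb i j == 1) = decide ((i, j) ∈ U)) :
    ∀ (is : List Int) (cnt : Int), (∀ i ∈ is, 0 ≤ i ∧ i < 32) →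
      pvCountGrid ga gb is cnt = cnt +
        ((is.flatMap (fun i => (PySem.List.pyRange 0 32 1).map (fun j => (i, j)))).countP
          (fun c => decide (c ∈ U)) : Int) := by
  intro is
  induction is with
  | nil => intro cnt _; simp [pvCountGrid]
  | cons i rest ih =>
    intro cnt hvalid
    rw [pvCountGrid,
        pvCountRowEq ga gb U i (fun j hv => hcond i j hv) _ cnt
          (by intro j hj
              rw [PySem.List.mem_pyRange_one] at hj
              have := hvalid i (by simp)
              exact ⟨this.1, this.2, hj.1, hj.2⟩),
        ih _ (fun i' hi' => hvalid i' (by simp [hi']))]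
    rw [List.flatMap_cons, List.countP_append, List.countP_map]
    have : (fun c => decide (c ∈ U)) ∘ (fun j => (i, j)) = fun j => decide ((i, j) ∈ U) := rfl
    rw [this]
    push_cast
    ring

lemma pvCountEqLen (U : PySem.Set (Int × Int)) (hnd : U.Nodup)
    (hsub : ∀ c ∈ U, pvValid c.1 c.2) :
    ((pvRect 0 0 32).countP (fun c => decide (c ∈ U)) : Int) = PySem.Set.len U := by
  have hcells : (pvRect 0 0 32).Nodup := pvRectNodup 0 0 32
  have hperm : ((pvRect 0 0 32).filter (fun c => decide (c ∈ U))).Perm U := by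
    rw [List.perm_ext_iff_of_nodup (List.Nodup.filter _ hcells) hnd]
    intro c
    rw [List.mem_filter, pvMemRect]
    constructor
    · rintro ⟨_, h⟩; simpa using h
    · intro h
      refine ⟨?_, by simpa using h⟩
      have := hsub c h
      unfold pvValid at this
      unfold pvInR
      omega
  rw [List.countP_eq_length_filter, hperm.length_eq]
  simp [PySem.Set.len]

-- ===== VERDICT (by name: the statement is the Claim_ definition above) =====
theorem solution_spec : Claim_equal_solution := by
  intro a b _ hpre
  obtain ⟨hpa, hpb⟩ := hpre
  have hreg : ∀ c : Int × Int, pvInR c 0 0 32 → pvValid c.1 c.2 := by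
    rintro ⟨i, j⟩ hc; unfold pvInR at hc; unfold pvValid; omega
  have hzero : ∀ c : Int × Int, pvInR c 0 0 32 → pvGet2 pvInit c.1 c.2 = 0 :=
    fun c _ => pvGet2Init c.1 c.2
  obtain ⟨ra, Sa, rb, Sb, hBa, _, _, hnda, hsuba, hBb, _, _, hndb, hsubb, hM⟩ :=
    pvMergeMain (a.toList.length + b.toList.length) a.toList b.toList 0 0 32
      (by omega) (by omega) ⟨0, hpa⟩ ⟨0, hpb⟩ hreg (by norm_num)
  obtain ⟨ra', Sa', ga, hAa, hBa', _, _, _, _, _, hpta⟩ :=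
    pvMain a.toList.length a.toList 0 0 32 pvInit le_rfl ⟨0, hpa⟩ pvWFInit hreg hzero
  obtain ⟨rb', Sb', gb, hAb, hBb', _, _, _, _, _, hptb⟩ :=
    pvMain b.toList.length b.toList 0 0 32 pvInit le_rfl ⟨0, hpb⟩ pvWFInit hreg hzero
  have hea : Sa' = Sa := by
    have h1 := (hBa' a.toList.length le_rfl).symm.trans (hBa a.toList.length le_rfl)
    have := (Option.some.injEq _ _).mp h1
    exact ((Prod.mk.injEq _ _ _ _).mp this).2
  have heb : Sb' = Sb := by
    have h1 := (hBb' b.toList.length le_rfl).symm.trans (hBb b.toList.length le_rfl)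
    have := (Option.some.injEq _ _).mp h1
    exact ((Prod.mk.injEq _ _ _ _).mp this).2
  subst hea; subst heb
  unfold Spec_solution solution solution_alt
  simp only [hAa, hAb, hM (a.toList.length + b.toList.length) (by omega) (by omega)]
  set U := PySem.Set.union Sa' Sb' with hU
  have hcond : ∀ i j : Int, pvValid i j →
      (pvGet2 ga i j == 1 || pvGet2 gb i j == 1) = decide ((i, j) ∈ U) := by
    intro i j hv
    rw [hpta i j hv, hptb i j hv, pvGet2Init]
    by_cases ha : (i, j) ∈ Sa' <;> by_cases hb : (i, j) ∈ Sb' <;>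
      simp [ha, hb, hU, PySem.Set.mem_union]
  rw [pvCountGridEq ga gb U hcond (PySem.List.pyRange 0 32 1) 0
        (by intro i hi; rw [PySem.List.mem_pyRange_one] at hi; exact hi)]
  have hrect : (PySem.List.pyRange 0 32 1).flatMap
      (fun i => (PySem.List.pyRange 0 32 1).map (fun j => (i, j))) = pvRect 0 0 32 := by
    unfold pvRect pvBlacks.pvRect; norm_num
  rw [hrect, zero_add]
  exact pvCountEqLen U (PySem.Set.nodup_union _ _ hnda)
    (by intro c hc
        rw [hU, PySem.Set.mem_union] at hc
        rcases hc with h | h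
        · exact hreg c (hsuba c h)
        · exact hreg c (hsubb c h))
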